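-- pv_equiv track=rewrite | github.com/Mrinmoy-1601/Computational_Instrumentations | Difference Operators/backward.py | calculate_backward_difference
-- ===== SOURCE A (Python) =====
-- def calculate_backward_difference(input_data):
--     n = len(input_data)
--     backward_diff_table = [input_data]
--
--     for i in range(1, n):
--         prev_row = backward_diff_table[-1]
--         next_row = [prev_row[j] - prev_row[j-1] for j in range(1, len(prev_row))]
--         backward_diff_table.append(next_row)
--
--     return backward_diff_table
-- ===== SOURCE B (Python) =====
-- def calculate_backward_difference(input_data):
--     if len(input_data) <= 1:
--         return [input_data]
--     next_row = [input_data[j] - input_data[j-1] for j in range(1, len(input_data))]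
--     return [input_data] + calculate_backward_difference(next_row)
-- ===== Notes on version B (the rewrite author's own statement) =====
-- stated objective: simpler
-- what changed: Replaces the explicit loop that appends to and re-reads the tail of an accumulated table with direct structural recursion on the shrinking row (row, then the table of its difference row).
import Mathlib
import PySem

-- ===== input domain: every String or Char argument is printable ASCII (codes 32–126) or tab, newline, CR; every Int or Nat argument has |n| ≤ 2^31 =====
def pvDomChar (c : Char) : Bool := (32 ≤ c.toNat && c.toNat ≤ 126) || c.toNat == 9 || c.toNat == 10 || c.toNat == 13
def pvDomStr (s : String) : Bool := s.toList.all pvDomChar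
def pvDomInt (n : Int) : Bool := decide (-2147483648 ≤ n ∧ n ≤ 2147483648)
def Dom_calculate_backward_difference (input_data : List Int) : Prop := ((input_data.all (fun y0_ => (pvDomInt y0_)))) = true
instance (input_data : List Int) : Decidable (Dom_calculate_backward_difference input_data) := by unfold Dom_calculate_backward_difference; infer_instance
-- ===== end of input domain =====

-- B replaces A's table-accumulating loop by structural recursion on the shrinking row (simpler decomposition, same cost).

-- shared helper: the adjacent-difference list comprehension
-- '[row[j] - row[j-1] for j in range(1, len(row))]' appearing verbatim in both sources
def pvRow (row : List Int) : List Int :=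
  (PySem.List.pyRange 1 (row.length : Int) 1).map
    (fun j => PySem.List.pyGetD row j 0 - PySem.List.pyGetD row (j - 1) 0)

theorem pvRow_length (r : List Int) : (pvRow r).length = r.length - 1 := by
  simp [pvRow, PySem.List.length_pyRange_one]

-- ===== PORT A =====
def calculate_backward_difference (input_data : List Int) : List (List Int) :=
  let n : Int := input_data.length
  let backward_diff_table : List (List Int) := [input_data]
  (PySem.List.pyRange 1 n 1).foldl
    (fun backward_diff_table _i =>
      let prev_row := PySem.List.pyGetD backward_diff_table (-1) []
      let next_row := pvRow prev_row
      backward_diff_table ++ [next_row])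
    backward_diff_table

-- ===== PORT B =====
def calculate_backward_difference_alt (input_data : List Int) : List (List Int) :=
  if input_data.length ≤ 1 then [input_data]
  else
    let next_row := pvRow input_data
    input_data :: calculate_backward_difference_alt next_row
termination_by input_data.length
decreasing_by rw [pvRow_length]; omega

-- ===== PRECONDITION & SPEC =====
def Spec_calculate_backward_difference (input_data : List Int) (out : List (List Int)) : Prop := out = calculate_backward_difference_alt input_data
instance (input_data : List Int) (out : List (List Int)) : Decidable (Spec_calculate_backward_difference input_data out) := by unfold Spec_calculate_backward_difference; infer_instance

-- ===== CLAIM (what is proved, stated in full; the proofs are below) =====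
def Claim_equal_calculate_backward_difference : Prop := ∀ (input_data : List Int), Dom_calculate_backward_difference input_data → Spec_calculate_backward_difference input_data (calculate_backward_difference input_data)

-- ===== LEMMAS AND PROOFS =====

-- the loop body of A, as a function of the table alone (the index is unused)
def pvStep (t : List (List Int)) : List (List Int) :=
  t ++ [pvRow (PySem.List.pyGetD t (-1) [])]

theorem pvFoldl_const {α : Type} (f : List (List Int) → List (List Int)) :
    ∀ (l : List α) (init : List (List Int)),
      l.foldl (fun t _ => f t) init = f^[l.length] init := by
  intro l
  induction l with
  | nil => intro init; simp
  | cons x xs ih =>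
      intro init
      simp [List.foldl_cons, ih, Function.iterate_succ_apply]

theorem pvStep_ne_nil (t : List (List Int)) : pvStep t ≠ [] := by
  simp [pvStep]

theorem pvStep_append (acc ys : List (List Int)) (h : ys ≠ []) :
    pvStep (acc ++ ys) = acc ++ pvStep ys := by
  unfold pvStep
  rw [PySem.List.pyGetD_neg_one (acc ++ ys) [] (by simp [h]),
      PySem.List.pyGetD_neg_one ys [] h,
      List.getLast_append_of_right_ne_nil acc ys h]
  simp

theorem pvStep_iter_append :
    ∀ (k : Nat) (acc ys : List (List Int)), ys ≠ [] →
      pvStep^[k] (acc ++ ys) = acc ++ pvStep^[k] ys := by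
  intro k
  induction k with
  | zero => intro acc ys _; simp
  | succ k ih =>
      intro acc ys h
      rw [Function.iterate_succ_apply, Function.iterate_succ_apply,
          pvStep_append acc ys h, ih acc (pvStep ys) (pvStep_ne_nil ys)]

theorem pvIter_eq_alt :
    ∀ (k : Nat) (r : List Int), r.length = k + 1 →
      pvStep^[k] [r] = calculate_backward_difference_alt r := by
  intro k
  induction k with
  | zero =>
      intro r hr
      rw [calculate_backward_difference_alt]
      simp [hr]
  | succ k ih =>
      intro r hr
      rw [Function.iterate_succ_apply]
      have h1 : pvStep [r] = [r] ++ [pvRow r] := by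
        unfold pvStep
        rw [PySem.List.pyGetD_neg_one [r] [] (by simp)]
        simp
      rw [h1, pvStep_iter_append k [r] [pvRow r] (by simp),
          ih (pvRow r) (by rw [pvRow_length, hr]; omega)]
      conv_rhs => rw [calculate_backward_difference_alt]
      simp [hr]

-- ===== VERDICT (by name: the statement is the Claim_ definition above) =====
theorem calculate_backward_difference_spec : Claim_equal_calculate_backward_difference := by
  intro input_data _
  unfold Spec_calculate_backward_difference calculate_backward_difference
  have hfold := pvFoldl_const pvStep (PySem.List.pyRange 1 (input_data.length : Int) 1) [input_data]
  simp only [pvStep] at hfold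
  rw [hfold]
  cases h : input_data with
  | nil =>
      rw [calculate_backward_difference_alt]
      simp [PySem.List.pyRange_one_eq_nil]
  | cons x xs =>
      rw [← h]
      have hlen : input_data.length = xs.length + 1 := by rw [h]; simp
      have hrl : (PySem.List.pyRange 1 (input_data.length : Int) 1).length = xs.length := by
        rw [PySem.List.length_pyRange_one, hlen]; omega
      rw [hrl, pvIter_eq_alt xs.length input_data hlen]
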